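-- pv_equiv track=rewrite | github.com/wagnersistemalima/Algoritimos-importantes-Python | pacote dawload/Projetos de algoritimo em Python/Algoritimo para descobrir o nome da pessoa com maior idade em dicionario.py | maior_idade
-- ===== SOURCE A (Python) =====
-- def maior_idade(variavel):
--     cont = 0
--     maior = 0
--     fulano = ' '
--     for nome, idade in variavel.items():
--         if cont == 0:
--             maior = idade
--             fulano = nome
--         else:
--             if idade > maior:
--                 maior = idade
--                 fulano = nome
--         cont = cont + 1
--     return fulano
-- ===== SOURCE B (Python) =====
-- def maior_idade(variavel):
--     itens = list(variavel.items())
--     if not itens: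
--         return ' '
--     ordenado = sorted(itens, key=lambda kv: kv[1], reverse=True)
--     return ordenado[0][0]
-- ===== Notes on version B (the rewrite author's own statement) =====
-- stated objective: alternative
-- what changed: Replaces the counter-guarded running-max scan with a sort-then-index strategy: sort the items by age descending with Python's stable sort and return the first entry's name (empty dict returns ' ' as in A).
import Mathlib
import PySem

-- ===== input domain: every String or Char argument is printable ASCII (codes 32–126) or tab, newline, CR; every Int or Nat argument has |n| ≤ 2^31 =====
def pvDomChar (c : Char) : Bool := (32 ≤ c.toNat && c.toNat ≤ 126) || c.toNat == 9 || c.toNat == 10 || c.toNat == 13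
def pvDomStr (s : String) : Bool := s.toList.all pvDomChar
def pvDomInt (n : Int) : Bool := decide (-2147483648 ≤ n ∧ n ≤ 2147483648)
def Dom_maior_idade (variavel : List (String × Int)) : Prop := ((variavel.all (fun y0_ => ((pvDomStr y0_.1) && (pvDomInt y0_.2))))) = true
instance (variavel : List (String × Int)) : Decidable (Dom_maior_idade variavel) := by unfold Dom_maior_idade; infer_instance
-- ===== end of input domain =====

-- B replaces A's counter-guarded running-max scan with a stable descending sort of the
-- items followed by taking the first entry's name (objective: alternative decomposition).

-- ===== PORT A =====
-- A: loop over the dict items with state (cont, maior, fulano); the first iteration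
-- (cont == 0) always takes the entry, later ones only on a strictly larger age.
def maior_idade (variavel : List (String × Int)) : String :=
  (variavel.foldl
    (fun (s : Int × Int × String) p =>
      if s.1 = 0 then (s.1 + 1, p.2, p.1)
      else if p.2 > s.2.1 then (s.1 + 1, p.2, p.1)
      else (s.1 + 1, s.2.1, s.2.2))
    (0, 0, " ")).2.2

-- ===== PORT B =====
-- B: early-return ' ' on the empty dict, otherwise sort the items by age descending
-- (stable) and return the first entry's name.  'ordenado[0]' is total here because the
-- sorted list of a nonempty list is nonempty, so headD's default is never used.
def maior_idade_alt (variavel : List (String × Int)) : String :=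
  if variavel = [] then " "
  else ((PySem.List.sorted variavel (fun kv => kv.2) true).headD (" ", 0)).1

-- ===== PRECONDITION & SPEC =====
def Spec_maior_idade (variavel : List (String × Int)) (out : String) : Prop := out = maior_idade_alt variavel
instance (variavel : List (String × Int)) (out : String) : Decidable (Spec_maior_idade variavel out) := by unfold Spec_maior_idade; infer_instance

-- ===== CLAIM (what is proved, stated in full; the proofs are below) =====
def Claim_equal_maior_idade : Prop := ∀ (variavel : List (String × Int)), Dom_maior_idade variavel → Spec_maior_idade variavel (maior_idade variavel)

-- ===== LEMMAS AND PROOFS =====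

-- reference scan: first pair with maximal age, starting from b
def pvBest (t : List (String × Int)) (b : String × Int) : String × Int :=
  t.foldl (fun b q => if b.2 < q.2 then q else b) b

-- head of inserting into a nonempty descending accumulator
theorem pv_head_insertBy (x h : String × Int) (t : List (String × Int)) :
    PySem.List.insertBy (fun a b => decide (b.2 < a.2)) x (h :: t) =
      (if h.2 < x.2 then x else h) ::
        (if h.2 < x.2 then h :: t else PySem.List.insertBy (fun a b => decide (b.2 < a.2)) x t) := by
  simp [PySem.List.insertBy]
  split <;> simp

-- the head of B's insertion-sort fold is the running first-max scan
theorem pv_foldl_insertBy_head (xs : List (String × Int)) :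
    ∀ (h : String × Int) (t : List (String × Int)),
      (xs.foldl (fun acc x => PySem.List.insertBy (fun a b => decide (b.2 < a.2)) x acc) (h :: t)).headD (" ", 0)
        = pvBest xs h := by
  induction xs with
  | nil => intro h t; simp [pvBest]
  | cons x xs ih =>
    intro h t
    simp only [List.foldl_cons, pv_head_insertBy, pvBest, List.foldl_cons]
    by_cases hx : h.2 < x.2
    · simp only [hx, if_pos]
      exact ih x (h :: t)
    · simp only [hx, if_false]
      exact ih h _

-- A's fold, once past the first (cont = 0) iteration, is the same running scan
theorem pv_foldl_A (xs : List (String × Int)) :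
    ∀ (c : Int) (b : String × Int), 0 < c →
      xs.foldl
        (fun (s : Int × Int × String) p =>
          if s.1 = 0 then (s.1 + 1, p.2, p.1)
          else if p.2 > s.2.1 then (s.1 + 1, p.2, p.1)
          else (s.1 + 1, s.2.1, s.2.2))
        (c, b.2, b.1)
      = (c + xs.length, (pvBest xs b).2, (pvBest xs b).1) := by
  induction xs with
  | nil => intro c b _; simp [pvBest]
  | cons x xs ih =>
    intro c b hc
    have hc0 : ¬ c = 0 := by omega
    simp only [List.foldl_cons, hc0, if_false, pvBest, List.foldl_cons]
    by_cases hx : b.2 < x.2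
    · have : x.2 > b.2 := hx
      simp only [this, if_pos]
      have := ih (c + 1) x (by omega)
      simp [pvBest] at this
      simp [this]
      omega
    · have hgt : ¬ x.2 > b.2 := hx
      simp only [hgt, if_false]
      have := ih (c + 1) b (by omega)
      simp [pvBest] at this
      simp [this]
      omega

-- ===== VERDICT (by name: the statement is the Claim_ definition above) =====
theorem maior_idade_spec : Claim_equal_maior_idade := by
  intro variavel _
  unfold Spec_maior_idade maior_idade maior_idade_alt
  cases variavel with
  | nil => simp
  | cons p rest =>
    have hB :
        ((PySem.List.sorted (p :: rest) (fun kv => kv.2) true).headD (" ", 0)) = pvBest rest p := by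
      rw [PySem.List.sorted_rev_eq_foldl_insertBy]
      simp only [List.foldl_cons, PySem.List.insertBy]
      exact pv_foldl_insertBy_head rest p []
    have hA := pv_foldl_A rest 1 p (by omega)
    rw [List.foldl_cons]
    have hstep :
        (if ((0 : Int), (0 : Int), " ").1 = 0 then (((0 : Int), (0 : Int), " ").1 + 1, p.2, p.1)
         else if p.2 > ((0 : Int), (0 : Int), " ").2.1 then (((0 : Int), (0 : Int), " ").1 + 1, p.2, p.1)
         else (((0 : Int), (0 : Int), " ").1 + 1, ((0 : Int), (0 : Int), " ").2.1, ((0 : Int), (0 : Int), " ").2.2))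
          = ((1 : Int), p.2, p.1) := by norm_num
    rw [hstep, hA, hB]
    simp
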